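-- pv_equiv track=rewrite | github.com/Pistro/bike-routing | preprocessing/scores/bikeProfile.py | getConstantScoreAttr
-- ===== SOURCE A (Python) =====
-- def getConstantScoreAttr(tags):
-- 	pauze = ['bar', 'bbq', 'biergarten', 'cafe', 'drinking_water', 'fast_food', 'ice_cream', 'pub', 'restaurant', 'toilets']
-- 	pauzeCnt = 0
-- 	conf = ['bicycle_parking']
-- 	confCnt = 0
-- 	occ = ['bicycle_repair_station', 'bicycle_rental']
-- 	occCnt = 0
-- 	sight = ['fountain', 'place_of_worship']
-- 	sightCnt = 0
-- 	for tag in tags: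
-- 		if (tag in pauze):
-- 			pauzeCnt += 1
-- 		if (tag in conf):
-- 			confCnt += 1
-- 		if (tag in occ):
-- 			occCnt += 1
-- 		if (tag in sight):
-- 			sightCnt += 1
-- 	score = -100*sightCnt
-- 	if (pauzeCnt):
-- 		score -= 250
-- 	if (confCnt):
-- 		score -= 100
-- 	if (occCnt):
-- 		score -= 50
-- 	return score
-- ===== SOURCE B (Python) =====
-- PAUZE = frozenset(['bar', 'bbq', 'biergarten', 'cafe', 'drinking_water',
--                    'fast_food', 'ice_cream', 'pub', 'restaurant', 'toilets'])
-- OCC = frozenset(['bicycle_repair_station', 'bicycle_rental'])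
--
-- def getConstantScoreAttr(tags):
--     tags = list(tags)
--     present = set(tags)
--     return (-100 * (tags.count('fountain') + tags.count('place_of_worship'))
--             - 250 * (not PAUZE.isdisjoint(present))
--             - 100 * ('bicycle_parking' in present)
--             - 50 * (not OCC.isdisjoint(present)))
-- ===== Notes on version B (the rewrite author's own statement) =====
-- stated objective: idiomatic
-- what changed: B keeps no running counters and no explicit loop: it materialises set(tags) once, decides each category penalty by frozenset disjointness/membership, gets the sight count from two list.count calls, and returns one branch-free arithmetic expression with booleans as 0/1 multipliers, replacing A's single pass with four counters, per-tag list membership scans and an if-chain.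
import Mathlib
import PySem

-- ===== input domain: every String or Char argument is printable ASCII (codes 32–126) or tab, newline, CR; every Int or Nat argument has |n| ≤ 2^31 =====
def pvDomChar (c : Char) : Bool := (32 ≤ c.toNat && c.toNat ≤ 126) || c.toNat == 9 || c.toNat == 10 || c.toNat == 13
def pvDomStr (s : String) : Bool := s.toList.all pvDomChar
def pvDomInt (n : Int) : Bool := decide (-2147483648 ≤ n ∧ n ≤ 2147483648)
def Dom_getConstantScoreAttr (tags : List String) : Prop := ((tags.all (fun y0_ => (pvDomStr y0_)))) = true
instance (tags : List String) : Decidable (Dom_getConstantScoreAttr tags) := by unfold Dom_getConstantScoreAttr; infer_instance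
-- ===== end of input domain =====

-- B drops A's loop with four running counters: it builds set(tags) once and reads the score
-- off set-disjointness tests and list.count in one branch-free expression (idiomatic restructuring).

def pvPauze : List String := ["bar", "bbq", "biergarten", "cafe", "drinking_water", "fast_food", "ice_cream", "pub", "restaurant", "toilets"]
def pvConf : List String := ["bicycle_parking"]
def pvOcc : List String := ["bicycle_repair_station", "bicycle_rental"]
def pvSight : List String := ["fountain", "place_of_worship"]

-- ===== PORT A =====
def getConstantScoreAttr (tags : List String) : Int :=
  let st := tags.foldl
    (fun (st : Int × Int × Int × Int) tag =>
      let st := if tag ∈ pvPauze then (st.1 + 1, st.2.1, st.2.2.1, st.2.2.2) else st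
      let st := if tag ∈ pvConf then (st.1, st.2.1 + 1, st.2.2.1, st.2.2.2) else st
      let st := if tag ∈ pvOcc then (st.1, st.2.1, st.2.2.1 + 1, st.2.2.2) else st
      let st := if tag ∈ pvSight then (st.1, st.2.1, st.2.2.1, st.2.2.2 + 1) else st
      st)
    (0, 0, 0, 0)
  let score := -100 * st.2.2.2
  let score := if st.1 ≠ 0 then score - 250 else score
  let score := if st.2.1 ≠ 0 then score - 100 else score
  let score := if st.2.2.1 ≠ 0 then score - 50 else score
  score

-- ===== PORT B =====
def pvPauzeSet : PySem.Set String := PySem.Set.ofList pvPauze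
def pvOccSet : PySem.Set String := PySem.Set.ofList pvOcc

def getConstantScoreAttr_alt (tags : List String) : Int :=
  let present : PySem.Set String := PySem.Set.ofList tags
  let base : Int := -100 * ((tags.count "fountain" : Int) + (tags.count "place_of_worship" : Int))
  base - 250 * (if PySem.Set.isdisjoint pvPauzeSet present then 0 else 1)
       - 100 * (if PySem.Set.contains present "bicycle_parking" then 1 else 0)
       - 50 * (if PySem.Set.isdisjoint pvOccSet present then 0 else 1)

-- ===== PRECONDITION & SPEC =====
def Spec_getConstantScoreAttr (tags : List String) (out : Int) : Prop := out = getConstantScoreAttr_alt tags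
instance (tags : List String) (out : Int) : Decidable (Spec_getConstantScoreAttr tags out) := by unfold Spec_getConstantScoreAttr; infer_instance

-- ===== CLAIM (what is proved, stated in full; the proofs are below) =====
def Claim_equal_getConstantScoreAttr : Prop := ∀ (tags : List String), Dom_getConstantScoreAttr tags → Spec_getConstantScoreAttr tags (getConstantScoreAttr tags)

-- ===== LEMMAS AND PROOFS =====

set_option maxHeartbeats 1000000

-- A's loop state after the fold: each counter advanced by the countP of its category.
theorem pvFoldA (tags : List String) (p c o s : Int) :
    tags.foldl
      (fun (st : Int × Int × Int × Int) tag =>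
        let st := if tag ∈ pvPauze then (st.1 + 1, st.2.1, st.2.2.1, st.2.2.2) else st
        let st := if tag ∈ pvConf then (st.1, st.2.1 + 1, st.2.2.1, st.2.2.2) else st
        let st := if tag ∈ pvOcc then (st.1, st.2.1, st.2.2.1 + 1, st.2.2.2) else st
        let st := if tag ∈ pvSight then (st.1, st.2.1, st.2.2.1, st.2.2.2 + 1) else st
        st)
      (p, c, o, s)
    = (p + tags.countP (· ∈ pvPauze), c + tags.countP (· ∈ pvConf),
       o + tags.countP (· ∈ pvOcc), s + tags.countP (· ∈ pvSight)) := by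
  induction tags generalizing p c o s with
  | nil => simp
  | cons hd tl ih =>
    simp only [List.foldl_cons, List.countP_cons]
    by_cases h1 : hd ∈ pvPauze <;> by_cases h2 : hd ∈ pvConf <;>
      by_cases h3 : hd ∈ pvOcc <;> by_cases h4 : hd ∈ pvSight <;>
      simp only [h1, h2, h3, h4, if_true, if_false, decide_true, decide_false,
        ih, Prod.mk.injEq] <;>
      push_cast <;> omega

theorem pvCountSight (tags : List String) :
    tags.countP (· ∈ pvSight) = tags.count "fountain" + tags.count "place_of_worship" := by
  induction tags with
  | nil => rfl
  | cons hd tl ih =>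
    rw [List.countP_cons, ih, List.count_cons, List.count_cons]
    by_cases h1 : hd = "fountain" <;> by_cases h2 : hd = "place_of_worship" <;>
      simp_all [pvSight] <;> omega

-- 'countP (· ∈ cat) ≠ 0' over tags is exactly 'cat and set(tags) are not disjoint'.
theorem pvCatDisjoint (tags cat : List String) :
    ((tags.countP (fun x => decide (x ∈ cat)) : Int) ≠ 0)
      ↔ ¬ (PySem.Set.isdisjoint (PySem.Set.ofList cat) (PySem.Set.ofList tags) = true) := by
  rw [PySem.Set.isdisjoint_iff]
  simp only [ne_eq, Nat.cast_eq_zero, List.countP_eq_zero, decide_eq_true_eq, not_forall,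
    PySem.Set.mem_ofList]
  push Not
  constructor
  · rintro ⟨x, hx, hc⟩; exact ⟨x, hc, hx⟩
  · rintro ⟨x, hx, hc⟩; exact ⟨x, hc, hx⟩

-- ===== VERDICT (by name: the statement is the Claim_ definition above) =====
theorem getConstantScoreAttr_spec : Claim_equal_getConstantScoreAttr := by
  intro tags _
  unfold Spec_getConstantScoreAttr getConstantScoreAttr getConstantScoreAttr_alt
  simp only [pvFoldA, zero_add, pvCountSight]
  have hp := pvCatDisjoint tags pvPauze
  have hc : ((tags.countP (fun x => decide (x ∈ pvConf)) : Int) ≠ 0)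
      ↔ (PySem.Set.contains (PySem.Set.ofList tags) "bicycle_parking" = true) := by
    simp only [ne_eq, Nat.cast_eq_zero, List.countP_eq_zero, decide_eq_true_eq, not_forall,
      PySem.Set.contains_iff, PySem.Set.mem_ofList]
    push Not
    constructor
    · rintro ⟨x, hx, hm⟩
      simp only [pvConf, List.mem_singleton] at hm; exact hm ▸ hx
    · intro h; exact ⟨"bicycle_parking", h, by simp [pvConf]⟩
  have ho := pvCatDisjoint tags pvOcc
  simp only [pvPauzeSet, pvOccSet]
  by_cases Hp : PySem.Set.isdisjoint (PySem.Set.ofList pvPauze) (PySem.Set.ofList tags) = true <;>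
    by_cases Hc : PySem.Set.contains (PySem.Set.ofList tags) "bicycle_parking" = true <;>
    by_cases Ho : PySem.Set.isdisjoint (PySem.Set.ofList pvOcc) (PySem.Set.ofList tags) = true <;>
    simp only [Hp, Hc, Ho, hp, hc, ho, if_true, if_false] <;>
    simp_all <;> ring_nf
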